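-- pv_equiv track=rewrite | github.com/p-lots/codewars | 7-kyu/car-crash!-====-o='`o-/python/solution.py | car_crash
-- ===== SOURCE A (Python) =====
-- def car_crash(road):
--     car = "O='`o"
--     road = road.split('\n')
--     for line in road:
--         try:
--             car_idx = line.index("O='`o")
--             other_idx = line.rindex('X')
--             if other_idx > car_idx:
--                 return True
--         except:
--             continue
--     return False
-- ===== SOURCE B (Python) =====
-- import re
--
-- _CRASH = re.compile(re.escape("O='`o") + r".*X")
--
-- def car_crash(road):
--     return any(_CRASH.search(line) for line in road.split('\n'))
-- ===== Notes on version B (the rewrite author's own statement) =====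
-- stated objective: idiomatic
-- what changed: Replaces the per-line first-index/last-rindex comparison with bare try/except by a single precompiled regex existence test (car pattern followed by .*X) over the split lines, folded through any().
import Mathlib
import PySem

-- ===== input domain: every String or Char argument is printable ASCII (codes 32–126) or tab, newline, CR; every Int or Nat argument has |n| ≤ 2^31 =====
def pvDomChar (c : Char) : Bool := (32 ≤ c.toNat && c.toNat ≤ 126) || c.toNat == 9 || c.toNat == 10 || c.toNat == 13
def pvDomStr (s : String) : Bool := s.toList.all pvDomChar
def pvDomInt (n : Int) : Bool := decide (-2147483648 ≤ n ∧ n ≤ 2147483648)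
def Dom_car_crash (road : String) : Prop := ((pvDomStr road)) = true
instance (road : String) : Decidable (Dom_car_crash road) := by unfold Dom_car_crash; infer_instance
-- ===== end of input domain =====

-- B replaces A's first-index / last-rindex comparison (with bare try/except) by a single
-- regex existence test per line, folded through any()  (objective: idiomatic).

-- ===== PORT A =====
-- the for-loop with early 'return True'; try/except continue: .index / .rindex raising ↔ find/rfind = -1
def carLoopA : List String → Bool
  | [] => false
  | line :: rest =>
    let car_idx := PySem.Str.find line "O='`o"
    if car_idx = -1 then carLoopA rest
    else
      let other_idx := PySem.Str.rfind line "X"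
      if other_idx = -1 then carLoopA rest
      else if car_idx < other_idx then true else carLoopA rest

def car_crash (road : String) : Bool :=
  carLoopA ((PySem.Str.split? road "\n").getD [])

-- ===== PORT B =====
-- hand port of re.search(re.escape("O='`o") + ".*X", line) (no regex in PySem): exact — the
-- pattern matches iff some occurrence of the literal car in the line is followed by an 'X'.
def hitLine (cs : List Char) : Bool :=
  (List.range cs.length).any (fun i =>
    ("O='`o".toList.isPrefixOf (cs.drop i)) && (cs.drop (i + 5)).contains 'X')

def car_crash_alt (road : String) : Bool :=
  ((PySem.Str.split? road "\n").getD []).any (fun line => hitLine line.toList)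

-- ===== PRECONDITION & SPEC =====
def Spec_car_crash (road : String) (out : Bool) : Prop := out = car_crash_alt road
instance (road : String) (out : Bool) : Decidable (Spec_car_crash road out) := by unfold Spec_car_crash; infer_instance

-- ===== CLAIM (what is proved, stated in full; the proofs are below) =====
def Claim_equal_car_crash : Prop := ∀ (road : String), Dom_car_crash road → Spec_car_crash road (car_crash road)

-- ===== LEMMAS AND PROOFS =====

-- rfind.go checks positions k, k-1, …, 0 and returns the highest match (else -1)
theorem rfind_go_ge (s sub : List Char) (k i : Nat) (hik : i ≤ k)
    (h : sub.isPrefixOf (s.drop i) = true) :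
    (i : Int) ≤ PySem.Chars.rfind.go s sub k := by
  induction k with
  | zero =>
    interval_cases i
    rw [PySem.Chars.rfind.go]
    simp only [List.drop_zero] at h
    simp [h]
  | succ k ih =>
    rw [PySem.Chars.rfind.go]
    by_cases hp : sub.isPrefixOf (List.drop (k + 1) s) = true
    · simp only [hp, if_true]
      exact_mod_cast hik
    · simp only [hp]
      have hik' : i ≤ k := by
        rcases Nat.lt_or_ge i (k + 1) with h' | h'
        · omega
        · exfalso
          have hi : i = k + 1 := by omega
          rw [hi] at h
          exact hp h
      exact ih hik'

theorem rfind_go_mem (s sub : List Char) (k : Nat)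
    (h : PySem.Chars.rfind.go s sub k ≠ -1) :
    ∃ j ≤ k, PySem.Chars.rfind.go s sub k = (j : Int) ∧ sub.isPrefixOf (s.drop j) = true := by
  induction k with
  | zero =>
    rw [PySem.Chars.rfind.go] at h ⊢
    by_cases hp : sub.isPrefixOf s = true
    · exact ⟨0, le_refl _, by simp [hp], by simpa using hp⟩
    · simp [hp] at h
  | succ k ih =>
    rw [PySem.Chars.rfind.go] at h ⊢
    by_cases hp : sub.isPrefixOf (List.drop (k + 1) s) = true
    · exact ⟨k + 1, le_refl _, by simp [hp], hp⟩
    · simp only [hp] at h ⊢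
      obtain ⟨j, hj, hgo, hpre⟩ := ih h
      exact ⟨j, Nat.le_succ_of_le hj, hgo, hpre⟩

theorem mem_drop_iff (cs : List Char) (m : Nat) (c : Char) :
    c ∈ cs.drop m ↔ ∃ j, m ≤ j ∧ ∃ h : j < cs.length, cs[j] = c := by
  constructor
  · intro h
    obtain ⟨t, ht, hg⟩ := List.mem_iff_getElem.mp h
    rw [List.length_drop] at ht
    refine ⟨m + t, Nat.le_add_right _ _, ⟨by omega, ?_⟩⟩
    rw [← List.getElem_drop]
    exact hg
  · rintro ⟨j, hmj, hj, hg⟩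
    have hlt : j - m < (cs.drop m).length := by rw [List.length_drop]; omega
    have : (cs.drop m)[j - m] = c := by
      rw [List.getElem_drop]
      simp only [Nat.add_sub_cancel' hmj]
      exact hg
    exact List.mem_iff_getElem.mpr ⟨j - m, hlt, this⟩

theorem singleton_prefix_drop (cs : List Char) (j : Nat) (hj : j < cs.length)
    (hg : cs[j] = 'X') : List.isPrefixOf ['X'] (cs.drop j) = true := by
  rw [List.drop_eq_getElem_cons hj, hg]
  simp [List.isPrefixOf]

theorem hit_iff (cs : List Char) :
    hitLine cs = true ↔
      (PySem.Chars.find cs ['O', '=', '\'', '`', 'o'] ≠ -1 ∧ PySem.Chars.rfind cs ['X'] ≠ -1 ∧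
        PySem.Chars.find cs ['O', '=', '\'', '`', 'o'] < PySem.Chars.rfind cs ['X']) := by
  constructor
  · intro h
    obtain ⟨i, hi, hcond⟩ := List.any_eq_true.mp h
    rw [List.mem_range] at hi
    simp only [Bool.and_eq_true] at hcond
    obtain ⟨hp, hx⟩ := hcond
    have hpre : ['O', '=', '\'', '`', 'o'] <+: cs.drop i := List.isPrefixOf_iff_prefix.mp hp
    have hinf : ['O', '=', '\'', '`', 'o'] <:+: cs :=
      (hpre.isInfix).trans (List.drop_suffix i cs).isInfix
    have hfind : 0 ≤ PySem.Chars.find cs ['O', '=', '\'', '`', 'o'] :=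
      (PySem.Chars.find_nonneg_iff cs ['O', '=', '\'', '`', 'o']).mpr hinf
    obtain ⟨hfpre, hfmin⟩ := PySem.Chars.find_spec hfind
    have hfi : (PySem.Chars.find cs ['O', '=', '\'', '`', 'o']).toNat ≤ i := by
      by_contra hc
      exact hfmin i (by omega) hpre
    have hxm : 'X' ∈ cs.drop (i + 5) := by
      simpa using hx
    obtain ⟨j, hij, hjlen, hjg⟩ := (mem_drop_iff cs (i + 5) 'X').mp hxm
    have hxp := singleton_prefix_drop cs j hjlen hjg
    have hge : (j : Int) ≤ PySem.Chars.rfind.go cs ['X'] cs.length :=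
      rfind_go_ge cs ['X'] cs.length j (le_of_lt hjlen) hxp
    have hrw : PySem.Chars.rfind cs ['X'] = PySem.Chars.rfind.go cs ['X'] cs.length := by
      rfl
    rw [hrw]
    have hftn : ((PySem.Chars.find cs ['O', '=', '\'', '`', 'o']).toNat : Int)
        = PySem.Chars.find cs ['O', '=', '\'', '`', 'o'] := Int.toNat_of_nonneg hfind
    refine ⟨by omega, by omega, by omega⟩
  · rintro ⟨h1, h2, h3⟩
    have hf0 : 0 ≤ PySem.Chars.find cs ['O', '=', '\'', '`', 'o'] := by
      have := PySem.Chars.neg_one_le_find cs ['O', '=', '\'', '`', 'o']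
      omega
    obtain ⟨hfpre, hfmin⟩ := PySem.Chars.find_spec hf0
    set f := (PySem.Chars.find cs ['O', '=', '\'', '`', 'o']).toNat with hfdef
    have hftn : (f : Int) = PySem.Chars.find cs ['O', '=', '\'', '`', 'o'] := Int.toNat_of_nonneg hf0
    have hrw : PySem.Chars.rfind cs ['X'] = PySem.Chars.rfind.go cs ['X'] cs.length := rfl
    rw [hrw] at h2 h3
    obtain ⟨j, hjk, hgo, hjp⟩ := rfind_go_mem cs ['X'] cs.length h2
    have hjpre : ['X'] <+: cs.drop j := List.isPrefixOf_iff_prefix.mp hjp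
    have hjlen : j < cs.length := by
      obtain ⟨t, ht⟩ := hjpre
      have : (cs.drop j).length = cs.length - j := List.length_drop ..
      rw [← ht] at this
      simp only [List.length_append, List.length_cons, List.length_nil] at this
      omega
    have hjg : cs[j] = 'X' := by
      have hd : cs.drop j = cs[j] :: cs.drop (j + 1) := List.drop_eq_getElem_cons hjlen
      obtain ⟨t, ht⟩ := hjpre
      have h2' := ht.trans hd
      have hh : cs[j]? = some 'X' := by
        have := congrArg List.head? h2'
        simpa using this.symm
      have := (List.getElem?_eq_getElem hjlen).symm.trans hh
      exact Option.some.inj this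
    have hfj : f < j := by rw [hgo] at h3; omega
    have hflen : f + 5 ≤ cs.length := by
      have := hfpre.length_le
      rw [List.length_drop] at this
      simp at this
      omega
    have hge : f + 5 ≤ j := by
      by_contra hc
      have hd5 : j - f < 5 := by omega
      have hd1 : 1 ≤ j - f := by omega
      have hcar : (['O', '=', '\'', '`', 'o'] : List Char)[j - f]'(by simp; omega) = (cs.drop f)[j - f]'(by rw [List.length_drop]; omega) :=
        hfpre.getElem (by simp; omega)
      have hcs : (cs.drop f)[j - f]'(by rw [List.length_drop]; omega) = cs[j] := by
        rw [List.getElem_drop]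
        simp only [Nat.add_sub_cancel' (le_of_lt hfj)]
      rw [hcs, hjg] at hcar
      have hd : j - f = 1 ∨ j - f = 2 ∨ j - f = 3 ∨ j - f = 4 := by omega
      have hcar' : (['O', '=', '\'', '`', 'o'] : List Char)[j - f]? = some 'X' := by
        rw [List.getElem?_eq_getElem (by simp; omega), hcar]
      rcases hd with h | h | h | h <;> simp only [h] at hcar' <;> exact absurd hcar' (by decide)
    apply List.any_eq_true.mpr
    refine ⟨f, List.mem_range.mpr (by omega), ?_⟩
    simp only [Bool.and_eq_true]
    constructor
    · exact List.isPrefixOf_iff_prefix.mpr hfpre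
    · have : 'X' ∈ cs.drop (f + 5) :=
        (mem_drop_iff cs (f + 5) 'X').mpr ⟨j, hge, hjlen, hjg⟩
      simpa using this

theorem loopA_eq_any (ls : List String) :
    carLoopA ls = ls.any (fun line => hitLine line.toList) := by
  induction ls with
  | nil => rfl
  | cons l rest ih =>
    rw [carLoopA, List.any_cons, ih]
    simp only [PySem.Str.find_eq, PySem.Str.rfind_eq]
    by_cases h1 : PySem.Chars.find l.toList ['O', '=', '\'', '`', 'o'] = -1
    · have hf : hitLine l.toList ≠ true := fun hh => ((hit_iff _).mp hh).1 h1
      simp [h1, hf]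
    · by_cases h2 : PySem.Chars.rfind l.toList ['X'] = -1
      · have hf : hitLine l.toList ≠ true := fun hh => ((hit_iff _).mp hh).2.1 h2
        simp [h1, h2, hf]
      · by_cases h3 : PySem.Chars.find l.toList ['O', '=', '\'', '`', 'o'] < PySem.Chars.rfind l.toList ['X']
        · have ht : hitLine l.toList = true := (hit_iff _).mpr ⟨h1, h2, h3⟩
          simp [h1, h2, h3, ht]
        · have hf : hitLine l.toList ≠ true := fun hh => h3 ((hit_iff _).mp hh).2.2
          simp [h1, h2, h3, hf]

-- ===== VERDICT (by name: the statement is the Claim_ definition above) =====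
theorem car_crash_spec : Claim_equal_car_crash := by
  intro road _
  unfold Spec_car_crash car_crash car_crash_alt
  exact loopA_eq_any _
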